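-- pv_equiv track=rewrite | github.com/824zzy/Leetcode | 1_HashTable/Basic/binarysearch_235_Ancient_Astronaut_Theory_L0.py | solve
-- ===== SOURCE A (Python) =====
-- def solve(D, s):
--     mp = {c: i for i, c in enumerate(D)}
--     t = 0
--     for c in s:
--         if c in mp:
--             if t <= mp[c]: t = mp[c]
--             else: break
--     else: return True
--     return False
-- ===== SOURCE B (Python) =====
-- def solve(D, s):
--     # effective alphabet: D with only each character's last occurrence kept
--     # (a later occurrence of a letter supersedes an earlier one), in order
--     seen = set()
--     alpha = []
--     for c in reversed(D):
--         if c not in seen: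
--             seen.add(c)
--             alpha.append(c)
--     alpha.reverse()
--     # s restricted to alphabet letters, consecutive repeats collapsed
--     seq = []
--     for c in s:
--         if c in seen and (not seq or seq[-1] != c):
--             seq.append(c)
--     # s is ordered iff that sequence is a subsequence of the alphabet:
--     # two-pointer scan, no position map and no comparisons of indices
--     i = 0
--     for c in seq:
--         while i < len(alpha) and alpha[i] != c:
--             i += 1
--         if i == len(alpha):
--             return False
--         i += 1
--     return True
-- ===== Notes on version B (the rewrite author's own statement) =====
-- stated objective: alternative
-- what changed: Drops the position dict and integer comparisons entirely: B first builds the effective alphabet (D with only each character's last occurrence kept, by a reversed dedup pass), collapses s's consecutive repeats of alphabet letters, and decides the answer by a two-pointer subsequence check of that sequence against the alphabet.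
import Mathlib
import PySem

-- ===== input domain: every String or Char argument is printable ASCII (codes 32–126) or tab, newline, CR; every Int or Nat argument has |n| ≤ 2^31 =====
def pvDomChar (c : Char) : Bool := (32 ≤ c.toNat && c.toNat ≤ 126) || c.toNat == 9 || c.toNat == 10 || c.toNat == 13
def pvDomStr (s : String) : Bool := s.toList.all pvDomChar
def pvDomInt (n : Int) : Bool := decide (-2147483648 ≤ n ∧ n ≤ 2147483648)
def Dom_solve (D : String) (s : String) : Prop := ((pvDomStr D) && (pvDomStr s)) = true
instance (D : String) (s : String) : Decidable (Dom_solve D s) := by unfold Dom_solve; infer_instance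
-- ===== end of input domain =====

-- B drops A's position dict and integer comparisons: it builds the effective
-- alphabet (D keeping each character's last occurrence), collapses s's
-- consecutive repeats, and runs a two-pointer subsequence check (alternative).

-- ===== PORT A =====
-- mp = {c: i for i, c in enumerate(D)}
def mkMp (D : String) : PySem.Dict Char Int :=
  (PySem.List.enumerate D.toList 0).foldl (fun d p => d.insert p.2 p.1) PySem.Dict.empty

-- the for/else loop: t running position, break (-> False) on a decrease, else True
def solveLoop (mp : PySem.Dict Char Int) (t : Int) : List Char → Bool
  | [] => true
  | c :: cs =>
    if mp.contains c then
      if t ≤ mp.getD c 0 then solveLoop mp (mp.getD c 0) cs else false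
    else solveLoop mp t cs

def solve (D : String) (s : String) : Bool :=
  solveLoop (mkMp D) 0 s.toList

-- ===== PORT B =====
-- first loop: for c in reversed(D): if c not in seen: seen.add(c); alpha.append(c)
def buildAlpha (seen : PySem.Set Char) (acc : List Char) : List Char → PySem.Set Char × List Char
  | [] => (seen, acc)
  | c :: cs =>
    if seen.contains c then buildAlpha seen acc cs
    else buildAlpha (seen.add c) (acc ++ [c]) cs

-- second loop: seq of alphabet letters of s, consecutive repeats collapsed
-- (`last` is seq[-1] when seq is nonempty)
def collect (seen : PySem.Set Char) (last : Option Char) : List Char → List Char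
  | [] => []
  | c :: cs =>
    if seen.contains c ∧ last ≠ some c then c :: collect seen (some c) cs
    else collect seen last cs

-- the inner `while i < len(alpha) and alpha[i] != c: i += 1` plus the i == len test:
-- returns the suffix after the first match, none when the pointer runs off the end
def advance : List Char → Char → Option (List Char)
  | [], _ => none
  | d :: ds, c => if d = c then some ds else advance ds c

-- the outer two-pointer loop over seq
def subChk : List Char → List Char → Bool
  | _, [] => true
  | rem, c :: cs =>
    match advance rem c with
    | none => false
    | some rem' => subChk rem' cs

def solve_alt (D : String) (s : String) : Bool :=
  let p := buildAlpha PySem.Set.empty [] D.toList.reverse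
  let alpha := p.2.reverse
  let seq := collect p.1 none s.toList
  subChk alpha seq

-- ===== PRECONDITION & SPEC =====
def Spec_solve (D : String) (s : String) (out : Bool) : Prop := out = solve_alt D s
instance (D : String) (s : String) (out : Bool) : Decidable (Spec_solve D s out) := by unfold Spec_solve; infer_instance

-- ===== CLAIM (what is proved, stated in full; the proofs are below) =====
def Claim_equal_solve : Prop := ∀ (D : String) (s : String), Dom_solve D s → Spec_solve D s (solve D s)

-- ===== LEMMAS AND PROOFS =====

-- A's loop as a chain check over the looked-up values
def chain (t : Int) : List Int → Bool
  | [] => true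
  | v :: vs => (decide (t ≤ v)) && chain v vs

theorem solveLoop_eq_chain (mp : PySem.Dict Char Int) (cs : List Char) :
    ∀ t, solveLoop mp t cs = chain t (cs.filterMap (fun c => mp.get? c)) := by
  induction cs with
  | nil => intro t; rfl
  | cons c cs ih =>
    intro t
    cases h : mp.get? c with
    | none =>
      have hc : mp.contains c = false := by
        rw [PySem.Dict.contains_eq_isSome_get?, h]; rfl
      simp [solveLoop, hc, h, ih]
    | some v =>
      have hc : mp.contains c = true := by
        rw [PySem.Dict.contains_eq_isSome_get?, h]; rfl
      have hg : mp.getD c 0 = v := by simp [PySem.Dict.getD_eq_get?_getD, h]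
      by_cases ht : t ≤ v
      · simp [solveLoop, hc, hg, h, chain, ht, ih]
      · simp [solveLoop, hc, hg, h, chain, ht]

-- index of the LAST occurrence
def lastPos : List Char → Char → Option Nat
  | [], _ => none
  | d :: ds, c =>
    match lastPos ds c with
    | some k => some (k + 1)
    | none => if d = c then some 0 else none

theorem get?_foldl_ins (l : List Char) :
    ∀ (k : Int) (d : PySem.Dict Char Int) (c : Char),
      ((PySem.List.enumerate l k).foldl (fun d p => d.insert p.2 p.1) d).get? c =
        match lastPos l c with
        | some j => some (k + j)
        | none => d.get? c := by
  induction l with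
  | nil => intro k d c; simp [PySem.List.enumerate_nil, lastPos]
  | cons x xs ih =>
    intro k d c
    rw [PySem.List.enumerate_cons]
    simp only [List.foldl_cons]
    rw [ih]
    cases h : lastPos xs c with
    | some j =>
      simp only [lastPos, h]
      congr 1
      push_cast
      ring
    | none =>
      simp only [lastPos, h, PySem.Dict.get?_insert]
      by_cases hcx : c = x
      · subst hcx; simp
      · simp [hcx, Ne.symm hcx]


theorem mkMp_get? (D : String) (c : Char) :
    (mkMp D).get? c = (lastPos D.toList c).map (fun j => (j : Int)) := by
  unfold mkMp
  rw [get?_foldl_ins]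
  cases h : lastPos D.toList c with
  | some j => simp
  | none => simp [PySem.Dict.get?_empty]


theorem lastPos_append_singleton (l : List Char) (x c : Char) :
    lastPos (l ++ [x]) c = if x = c then some l.length else lastPos l c := by
  induction l with
  | nil => simp [lastPos]
  | cons d ds ih =>
    show (match lastPos (ds ++ [x]) c with
      | some k => some (k + 1)
      | none => if d = c then some 0 else none) =
      if x = c then some (d :: ds).length else lastPos (d :: ds) c
    rw [ih]
    by_cases hxc : x = c
    · subst hxc; simp
    · rw [if_neg hxc, if_neg hxc]
      rfl


theorem lastPos_none (l : List Char) (c : Char) (h : c ∉ l) : lastPos l c = none := by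
  induction l with
  | nil => rfl
  | cons d ds ih =>
    simp only [List.mem_cons, not_or] at h
    simp [lastPos, ih h.2, Ne.symm h.1]


theorem lastPos_reverse (l : List Char) (c : Char) (h : c ∈ l) :
    lastPos l.reverse c = some (l.length - 1 - l.idxOf c) := by
  induction l with
  | nil => cases h
  | cons x xs ih =>
    rw [List.reverse_cons, lastPos_append_singleton]
    by_cases hxc : x = c
    · simp [hxc]
    · have hc : c ∈ xs := by
        rcases List.mem_cons.mp h with h1 | h1
        · exact absurd h1.symm hxc
        · exact h1
      have hidx : xs.idxOf c < xs.length := List.idxOf_lt_length_of_mem hc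
      rw [if_neg hxc, ih hc]
      have : (x :: xs).idxOf c = xs.idxOf c + 1 := by
        simp [List.idxOf_cons, beq_false_of_ne hxc]
      rw [this]
      congr 1
      simp only [List.length_cons]
      omega


-- the value A's dict stores for c, as a function of the reversed list
def gZ (rl : List Char) (c : Char) : Int := ((rl.length - 1 - rl.idxOf c : Nat) : Int)

theorem mkMp_get?_mem (D : String) (c : Char) (h : c ∈ D.toList) :
    (mkMp D).get? c = some (gZ D.toList.reverse c) := by
  rw [mkMp_get?]
  have h' : c ∈ D.toList.reverse := by simpa using h
  have := lastPos_reverse D.toList.reverse c h'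
  rw [List.reverse_reverse] at this
  rw [this]
  rfl


theorem mkMp_get?_not_mem (D : String) (c : Char) (h : c ∉ D.toList) :
    (mkMp D).get? c = none := by
  rw [mkMp_get?, lastPos_none _ _ h]
  rfl


theorem filterMap_mkMp (D : String) (cs : List Char) :
    cs.filterMap (fun c => (mkMp D).get? c) =
      (cs.filter (fun c => decide (c ∈ D.toList))).map (gZ D.toList.reverse) := by
  induction cs with
  | nil => rfl
  | cons c cs ih =>
    by_cases h : c ∈ D.toList
    · simp [mkMp_get?_mem D c h, h, ih]
    · simp [mkMp_get?_not_mem D c h, h, ih]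


-- buildAlpha facts
theorem buildAlpha_cons_of_mem (seen : PySem.Set Char) (acc : List Char) (c : Char)
    (cs : List Char) (h : c ∈ seen) :
    buildAlpha seen acc (c :: cs) = buildAlpha seen acc cs := by
  simp only [buildAlpha]
  rw [if_pos ((PySem.Set.contains_iff _ _).mpr h)]

theorem buildAlpha_cons_of_not_mem (seen : PySem.Set Char) (acc : List Char) (c : Char)
    (cs : List Char) (h : c ∉ seen) :
    buildAlpha seen acc (c :: cs) = buildAlpha (seen.add c) (acc ++ [c]) cs := by
  simp only [buildAlpha]
  rw [if_neg (fun hc => h ((PySem.Set.contains_iff _ _).mp hc))]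

theorem buildAlpha_acc (l : List Char) :
    ∀ (seen : PySem.Set Char) (acc : List Char),
      (buildAlpha seen acc l).2 = acc ++ (buildAlpha seen [] l).2 := by
  induction l with
  | nil => intro seen acc; simp [buildAlpha]
  | cons c cs ih =>
    intro seen acc
    by_cases hm : c ∈ seen
    · rw [buildAlpha_cons_of_mem _ _ _ _ hm, buildAlpha_cons_of_mem _ _ _ _ hm, ih]
    · rw [buildAlpha_cons_of_not_mem _ _ _ _ hm, buildAlpha_cons_of_not_mem _ _ _ _ hm,
        ih _ (acc ++ [c]), ih _ ([] ++ [c])]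
      simp

theorem buildAlpha_seen_mem (l : List Char) :
    ∀ (seen : PySem.Set Char) (acc : List Char) (x : Char),
      x ∈ (buildAlpha seen acc l).1 ↔ x ∈ l ∨ x ∈ seen := by
  induction l with
  | nil => intro seen acc x; simp [buildAlpha]
  | cons c cs ih =>
    intro seen acc x
    by_cases hm : c ∈ seen
    · rw [buildAlpha_cons_of_mem _ _ _ _ hm, ih]
      simp only [List.mem_cons]
      constructor
      · rintro (h1 | h1)
        · exact Or.inl (Or.inr h1)
        · exact Or.inr h1
      · rintro ((h1 | h1) | h1)
        · exact Or.inr (h1 ▸ hm)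
        · exact Or.inl h1
        · exact Or.inr h1
    · rw [buildAlpha_cons_of_not_mem _ _ _ _ hm, ih, PySem.Set.mem_add]
      simp only [List.mem_cons]
      tauto

theorem buildAlpha_out_mem (l : List Char) :
    ∀ (seen : PySem.Set Char) (x : Char),
      x ∈ (buildAlpha seen [] l).2 ↔ x ∈ l ∧ x ∉ seen := by
  induction l with
  | nil => intro seen x; simp [buildAlpha]
  | cons c cs ih =>
    intro seen x
    by_cases hm : c ∈ seen
    · rw [buildAlpha_cons_of_mem _ _ _ _ hm, ih]
      simp only [List.mem_cons]
      constructor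
      · rintro ⟨h1, h2⟩; exact ⟨Or.inr h1, h2⟩
      · rintro ⟨h1 | h1, h2⟩
        · exact absurd (h1 ▸ hm) h2
        · exact ⟨h1, h2⟩
    · rw [buildAlpha_cons_of_not_mem _ _ _ _ hm, buildAlpha_acc, List.nil_append,
        List.singleton_append, List.mem_cons, List.mem_cons]
      constructor
      · rintro (h1 | h1)
        · exact ⟨Or.inl h1, h1 ▸ hm⟩
        · have h2 := (ih (seen.add c) x).mp h1
          refine ⟨Or.inr h2.1, fun hx => h2.2 ?_⟩
          exact (PySem.Set.mem_add _ _ _).mpr (Or.inl hx)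
      · rintro ⟨h1 | h1, h2⟩
        · exact Or.inl h1
        · by_cases hxc : x = c
          · exact Or.inl hxc
          · refine Or.inr ((ih (seen.add c) x).mpr ⟨h1, fun hmem => ?_⟩)
            rcases (PySem.Set.mem_add _ _ _).mp hmem with h4 | h4
            · exact h2 h4
            · exact hxc h4

theorem buildAlpha_pairwise (l : List Char) :
    ∀ (seen : PySem.Set Char),
      ((buildAlpha seen [] l).2).Pairwise (fun x y => l.idxOf x < l.idxOf y) := by
  induction l with
  | nil => intro seen; simp [buildAlpha]
  | cons c cs ih =>
    intro seen
    by_cases hm : c ∈ seen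
    · rw [buildAlpha_cons_of_mem _ _ _ _ hm]
      refine (ih seen).imp_of_mem ?_
      intro x y hx hy hxy
      have hxcs : x ∉ seen := ((buildAlpha_out_mem cs seen x).mp hx).2
      have hycs : y ∉ seen := ((buildAlpha_out_mem cs seen y).mp hy).2
      have hxc : x ≠ c := fun he => hxcs (he ▸ hm)
      have hyc : y ≠ c := fun he => hycs (he ▸ hm)
      rw [List.idxOf_cons, List.idxOf_cons, beq_false_of_ne (Ne.symm hxc),
        beq_false_of_ne (Ne.symm hyc)]
      simpa using hxy
    · rw [buildAlpha_cons_of_not_mem _ _ _ _ hm, buildAlpha_acc, List.nil_append]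
      have hstep : ∀ y ∈ (buildAlpha (seen.add c) [] cs).2, y ≠ c := by
        intro y hy he
        have hyn : y ∉ seen.add c := ((buildAlpha_out_mem cs _ y).mp hy).2
        exact hyn (he ▸ (PySem.Set.mem_add _ _ _).mpr (Or.inr rfl))
      refine List.Pairwise.cons ?_ ?_
      · intro y hy
        rw [List.idxOf_cons, List.idxOf_cons, beq_self_eq_true,
          beq_false_of_ne (Ne.symm (hstep y hy))]
        simp
      · refine (ih (seen.add c)).imp_of_mem ?_
        intro x y hx hy hxy
        rw [List.idxOf_cons, List.idxOf_cons, beq_false_of_ne (Ne.symm (hstep x hx)),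
          beq_false_of_ne (Ne.symm (hstep y hy))]
        simpa using hxy

-- destutter of the filtered list = B's collect
def dst : Option Char → List Char → List Char
  | _, [] => []
  | last, c :: cs => if last = some c then dst last cs else c :: dst (some c) cs

theorem collect_eq_dst (seen : PySem.Set Char) (cs : List Char) :
    ∀ last, collect seen last cs = dst last (cs.filter (fun c => seen.contains c)) := by
  induction cs with
  | nil => intro last; rfl
  | cons c cs ih =>
    intro last
    by_cases hm : c ∈ seen
    · have hct : seen.contains c = true := (PySem.Set.contains_iff _ _).mpr hm
      have hf : (c :: cs).filter (fun c => seen.contains c) =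
          c :: cs.filter (fun c => seen.contains c) := by
        rw [List.filter_cons, if_pos (by exact hct)]
      rw [hf]
      by_cases hl : last = some c
      · show (if seen.contains c ∧ last ≠ some c then c :: collect seen (some c) cs
          else collect seen last cs) = _
        rw [if_neg (fun h => h.2 hl), hl]
        rw [show dst (some c) (c :: cs.filter (fun c => seen.contains c)) =
            dst (some c) (cs.filter (fun c => seen.contains c)) from by
          show (if some c = some c then _ else _) = _
          rw [if_pos rfl]]
        exact ih (some c)
      · show (if seen.contains c ∧ last ≠ some c then c :: collect seen (some c) cs
          else collect seen last cs) = _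
        rw [if_pos ⟨hct, hl⟩]
        rw [show dst last (c :: cs.filter (fun c => seen.contains c)) =
            c :: dst (some c) (cs.filter (fun c => seen.contains c)) from by
          show (if last = some c then _ else _) = _
          rw [if_neg hl]]
        rw [ih (some c)]
    · have hcf : seen.contains c = false := by
        cases h : seen.contains c
        · rfl
        · exact absurd ((PySem.Set.contains_iff _ _).mp h) hm
      have hf : (c :: cs).filter (fun c => seen.contains c) =
          cs.filter (fun c => seen.contains c) := by
        rw [List.filter_cons, if_neg (by rw [hcf]; exact Bool.false_ne_true)]
      rw [hf]
      show (if seen.contains c ∧ last ≠ some c then c :: collect seen (some c) cs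
        else collect seen last cs) = _
      rw [if_neg (fun h => by rw [hcf] at h; exact Bool.false_ne_true h.1)]
      exact ih last

-- advance facts
theorem advance_not_mem (l : List Char) (c : Char) (h : c ∉ l) : advance l c = none := by
  induction l with
  | nil => rfl
  | cons d ds ih =>
    simp only [List.mem_cons, not_or] at h
    simp [advance, Ne.symm h.1, ih h.2]


theorem advance_append (l₁ l₂ : List Char) (c : Char) (h : c ∉ l₁) :
    advance (l₁ ++ c :: l₂) c = some l₂ := by
  induction l₁ with
  | nil => simp [advance]
  | cons d ds ih =>
    simp only [List.mem_cons, not_or] at h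
    simp [advance, Ne.symm h.1, ih h.2]


-- the simulation, generic in the value function g
theorem sim (g : Char → Int) (fs : List Char) :
    ∀ (alpha pre rem : List Char) (a : Char),
      alpha.Pairwise (fun x y => g x < g y) → alpha = pre ++ a :: rem →
      (∀ x ∈ fs, x ∈ alpha) →
      chain (g a) (fs.map g) = subChk rem (dst (some a) fs) := by
  induction fs with
  | nil => intro alpha pre rem a hp he hm; rfl
  | cons c fs ih =>
    intro alpha pre rem a hp he hm
    have hnd : alpha.Nodup :=
      hp.imp (fun {x y} (hl : g x < g y) (heq : x = y) => absurd (heq ▸ hl) (lt_irrefl _))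
    have hca : c ∈ alpha := hm c List.mem_cons_self
    by_cases hc : c = a
    · subst hc
      show (decide (g c ≤ g c) && chain (g c) (fs.map g)) = subChk rem (dst (some c) (c :: fs))
      rw [show dst (some c) (c :: fs) = dst (some c) fs from by
        show (if some c = some c then _ else _) = _
        rw [if_pos rfl]]
      rw [decide_eq_true (le_refl (g c)), Bool.true_and]
      exact ih alpha pre rem c hp he (fun x hx => hm x (List.mem_cons_of_mem _ hx))
    · have hpa : (pre ++ a :: rem).Pairwise (fun x y => g x < g y) := he ▸ hp
      obtain ⟨hppre, hprest, hcross⟩ := List.pairwise_append.mp hpa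
      have hnda : (pre ++ a :: rem).Nodup := he ▸ hnd
      have hdisj := (List.nodup_append.mp hnda).2.2
      have hsplit : c ∈ pre ∨ c ∈ rem := by
        rw [he] at hca
        rcases List.mem_append.mp hca with h | h
        · exact Or.inl h
        · rcases List.mem_cons.mp h with h | h
          · exact absurd h hc
          · exact Or.inr h
      rw [show dst (some a) (c :: fs) = c :: dst (some c) fs from by
        show (if some a = some c then _ else _) = _
        rw [if_neg (fun hsome => hc (Option.some.inj hsome).symm)]]
      rcases hsplit with hcpre | hcrem
      · have hlt : g c < g a := hcross c hcpre a List.mem_cons_self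
        have hnot : c ∉ rem := fun hr => hdisj c hcpre c (List.mem_cons_of_mem _ hr) rfl
        show (decide (g a ≤ g c) && chain (g c) (fs.map g)) = subChk rem (c :: dst (some c) fs)
        rw [decide_eq_false (not_le.mpr hlt), Bool.false_and]
        show false = (match advance rem c with
          | none => false
          | some rem' => subChk rem' (dst (some c) fs))
        rw [advance_not_mem rem c hnot]
      · obtain ⟨r1, r2, hr⟩ := List.append_of_mem hcrem
        have hlt : g a < g c := (List.pairwise_cons.mp hprest).1 c hcrem
        have hndrem : rem.Nodup := ((List.nodup_append.mp hnda).2.1).of_cons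
        have hcnotr1 : c ∉ r1 := by
          intro hcr1
          have := hr ▸ hndrem
          exact (List.nodup_append.mp this).2.2 c hcr1 c List.mem_cons_self rfl
        show (decide (g a ≤ g c) && chain (g c) (fs.map g)) = subChk rem (c :: dst (some c) fs)
        rw [decide_eq_true (le_of_lt hlt), Bool.true_and, hr]
        rw [show subChk (r1 ++ c :: r2) (c :: dst (some c) fs) = subChk r2 (dst (some c) fs) from by
          show (match advance (r1 ++ c :: r2) c with
            | none => false
            | some rem' => subChk rem' (dst (some c) fs)) = _
          rw [advance_append r1 r2 c hcnotr1]]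
        refine ih alpha (pre ++ a :: r1) r2 c hp ?_ (fun x hx => hm x (List.mem_cons_of_mem _ hx))
        rw [he, hr]
        simp

theorem sim0 (g : Char → Int) (alpha : List Char) (fs : List Char)
    (hp : alpha.Pairwise (fun x y => g x < g y))
    (hmem : ∀ x ∈ fs, x ∈ alpha) (hnn : ∀ x ∈ alpha, 0 ≤ g x) :
    chain 0 (fs.map g) = subChk alpha (dst none fs) := by
  cases fs with
  | nil => rfl
  | cons c fs =>
    have hca : c ∈ alpha := hmem c List.mem_cons_self
    have hnd : alpha.Nodup :=
      hp.imp (fun {x y} (hl : g x < g y) (heq : x = y) => absurd (heq ▸ hl) (lt_irrefl _))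
    obtain ⟨pre, rem, he⟩ := List.append_of_mem hca
    have hcnotpre : c ∉ pre := by
      intro hcp
      have := he ▸ hnd
      exact (List.nodup_append.mp this).2.2 c hcp c List.mem_cons_self rfl
    show (decide ((0 : Int) ≤ g c) && chain (g c) (fs.map g)) = subChk alpha (dst none (c :: fs))
    rw [decide_eq_true (hnn c hca), Bool.true_and]
    rw [show dst none (c :: fs) = c :: dst (some c) fs from by
      show (if (none : Option Char) = some c then _ else _) = _
      rw [if_neg (by simp)]]
    rw [he]
    rw [show subChk (pre ++ c :: rem) (c :: dst (some c) fs) = subChk rem (dst (some c) fs) from by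
      show (match advance (pre ++ c :: rem) c with
        | none => false
        | some rem' => subChk rem' (dst (some c) fs)) = _
      rw [advance_append pre rem c hcnotpre]]
    exact sim g fs alpha pre rem c hp he (fun x hx => hmem x (List.mem_cons_of_mem _ hx))

-- ===== VERDICT (by name: the statement is the Claim_ definition above) =====
theorem solve_spec : Claim_equal_solve := by
  intro D s _
  unfold Spec_solve
  show solveLoop (mkMp D) 0 s.toList =
    subChk ((buildAlpha PySem.Set.empty [] D.toList.reverse).2.reverse)
      (collect (buildAlpha PySem.Set.empty [] D.toList.reverse).1 none s.toList)
  rw [solveLoop_eq_chain, filterMap_mkMp, collect_eq_dst]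
  have hseen : ∀ c ∈ s.toList,
      (buildAlpha PySem.Set.empty [] D.toList.reverse).1.contains c = decide (c ∈ D.toList) := by
    intro c _
    have h1 := buildAlpha_seen_mem D.toList.reverse PySem.Set.empty [] c
    by_cases h : c ∈ D.toList
    · have hm : c ∈ (buildAlpha PySem.Set.empty [] D.toList.reverse).1 :=
        h1.mpr (Or.inl (List.mem_reverse.mpr h))
      rw [(PySem.Set.contains_iff _ _).mpr hm, decide_eq_true h]
    · have hm : c ∉ (buildAlpha PySem.Set.empty [] D.toList.reverse).1 := by
        intro hm
        rcases h1.mp hm with h2 | h2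
        · exact h (List.mem_reverse.mp h2)
        · cases h2
      rw [decide_eq_false h]
      cases hco : (buildAlpha PySem.Set.empty [] D.toList.reverse).1.contains c
      · rfl
      · exact absurd ((PySem.Set.contains_iff _ _).mp hco) hm
  rw [List.filter_congr hseen]
  refine sim0 (gZ D.toList.reverse) _ _ ?_ ?_ ?_
  · rw [List.pairwise_reverse]
    refine (buildAlpha_pairwise D.toList.reverse PySem.Set.empty).imp_of_mem ?_
    intro x y hx hy hxy
    have hxm : x ∈ D.toList.reverse := ((buildAlpha_out_mem _ _ x).mp hx).1
    have hym : y ∈ D.toList.reverse := ((buildAlpha_out_mem _ _ y).mp hy).1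
    have hxl := List.idxOf_lt_length_of_mem hxm
    have hyl := List.idxOf_lt_length_of_mem hym
    show gZ D.toList.reverse y < gZ D.toList.reverse x
    unfold gZ
    have : D.toList.reverse.length - 1 - D.toList.reverse.idxOf y <
        D.toList.reverse.length - 1 - D.toList.reverse.idxOf x := by omega
    exact_mod_cast this
  · intro x hx
    have hxd : x ∈ D.toList := by
      have := List.of_mem_filter hx
      exact of_decide_eq_true this
    rw [List.mem_reverse]
    exact (buildAlpha_out_mem D.toList.reverse PySem.Set.empty x).mpr
      ⟨List.mem_reverse.mpr hxd, fun h => nomatch h⟩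
  · intro x _
    unfold gZ
    exact Int.natCast_nonneg _
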